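-- pv_equiv track=rewrite | github.com/ramprao/sma-vlbi-scripts | create-schedule.py | formatscans
-- ===== SOURCE A (Python) =====
-- def formatscans(name, wid, data):
--     mess = ''
--     act = 'upload'
--     while len(data) > wid:
--         ecmd = 'execute=' + act + ":" + name + ":" + data[0:wid] + ';\n'
--         mess = mess + ecmd
--         data = data[wid:]
--         act = 'append'
--     ecmd = 'execute=finish:' + name + ":" + data + ';\n'
--     mess = mess + ecmd
--     return mess
-- ===== SOURCE B (Python) =====
-- def formatscans(name, wid, data):
--     k = (len(data) - 1) // wid
--     parts = []
--     for i in range(k):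
--         act = 'upload' if i == 0 else 'append'
--         parts.append('execute=' + act + ':' + name + ':' + data[i * wid:(i + 1) * wid] + ';\n')
--     parts.append('execute=finish:' + name + ':' + data[k * wid:] + ';\n')
--     return ''.join(parts)
-- ===== Notes on version B (the rewrite author's own statement) =====
-- stated objective: alternative
-- what changed: B computes the number of non-final chunks in closed form k=(len(data)-1)//wid, indexes chunks by slicing the untouched data, and joins a list of parts, instead of A's destructive while-loop that repeatedly reslices data and concatenates onto a growing string.
-- outside the precondition, e.g. on formatscans('n', 0, ''): A returns 'execute=finish:n:;\n', B raises ZeroDivisionError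
import Mathlib
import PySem

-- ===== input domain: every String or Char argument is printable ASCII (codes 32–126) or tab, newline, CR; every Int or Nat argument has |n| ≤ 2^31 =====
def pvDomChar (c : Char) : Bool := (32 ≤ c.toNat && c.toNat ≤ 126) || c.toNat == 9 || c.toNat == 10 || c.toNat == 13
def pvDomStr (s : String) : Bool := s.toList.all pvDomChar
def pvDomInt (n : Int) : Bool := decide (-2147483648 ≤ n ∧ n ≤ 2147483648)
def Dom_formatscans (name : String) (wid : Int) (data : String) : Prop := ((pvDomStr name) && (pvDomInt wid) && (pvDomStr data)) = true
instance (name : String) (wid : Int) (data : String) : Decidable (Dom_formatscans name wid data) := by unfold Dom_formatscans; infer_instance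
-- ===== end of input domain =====

-- B replaces A's destructive while-loop (reslice data, concatenate onto a growing string) by a
-- closed-form chunk count k=(len-1)//wid, index-addressed slices of the untouched data, and a join.


-- ===== PORT A =====
-- A's while-loop; fuel = data.length bounds the iterations (each one drops wid ≥ 1 chars,
-- which Pre_ guarantees). Strings are handled as List Char (PySem convention).
def fsLoopA (name : List Char) (wid : Int) : Nat → List Char → List Char → List Char → List Char
  | 0, data, mess, _ =>
      mess ++ ("execute=finish:".toList ++ name ++ ":".toList ++ data ++ ";\n".toList)
  | fuel + 1, data, mess, act =>
      if wid < (data.length : Int) then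
        fsLoopA name wid fuel (PySem.List.slice data (some wid) none)
          (mess ++ ("execute=".toList ++ act ++ ":".toList ++ name ++ ":".toList
                    ++ PySem.List.slice data (some 0) (some wid) ++ ";\n".toList))
          "append".toList
      else
        mess ++ ("execute=finish:".toList ++ name ++ ":".toList ++ data ++ ";\n".toList)

def formatscans (name : String) (wid : Int) (data : String) : String :=
  String.ofList (fsLoopA name.toList wid data.toList.length data.toList [] "upload".toList)

-- ===== PORT B =====
def fsChunkB (name : List Char) (wid : Int) (data : List Char) (i : Int) : List Char :=
  "execute=".toList ++ (if i = 0 then "upload".toList else "append".toList)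
    ++ ":".toList ++ name ++ ":".toList
    ++ PySem.List.slice data (some (i * wid)) (some ((i + 1) * wid)) ++ ";\n".toList

def formatscans_alt (name : String) (wid : Int) (data : String) : String :=
  let k := PySem.Int.floordiv ((data.toList.length : Int) - 1) wid
  let parts := (PySem.List.pyRange 0 k 1).map (fsChunkB name.toList wid data.toList)
  let fin := "execute=finish:".toList ++ name.toList ++ ":".toList
             ++ PySem.List.slice data.toList (some (k * wid)) none ++ ";\n".toList
  String.ofList (parts ++ [fin]).flatten

-- ===== PRECONDITION & SPEC =====
-- A's loop terminates only for wid ≥ 1 (for wid ≤ 0 it loops forever on every input except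
-- wid = 0 with data = "", the one excluded input on which A returns but B's division by wid raises).
def Pre_formatscans (name : String) (wid : Int) (data : String) : Prop := 1 ≤ wid
instance (name : String) (wid : Int) (data : String) : Decidable (Pre_formatscans name wid data) := by unfold Pre_formatscans; infer_instance

def pvWitness_formatscans : String × Int × String := ("src", 3, "abcdefg")

def Spec_formatscans (name : String) (wid : Int) (data : String) (out : String) : Prop := out = formatscans_alt name wid data
instance (name : String) (wid : Int) (data : String) (out : String) : Decidable (Spec_formatscans name wid data out) := by unfold Spec_formatscans; infer_instance

-- ===== CLAIM (what is proved, stated in full; the proofs are below) =====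
def Claim_equal_formatscans : Prop := ∀ (name : String) (wid : Int) (data : String), Dom_formatscans name wid data → Pre_formatscans name wid data → Spec_formatscans name wid data (formatscans name wid data)

-- ===== LEMMAS AND PROOFS =====

-- B's body on lists, with the first chunk's action generalized (the shape of A's loop invariant).
def fsBodyB (name : List Char) (wid : Int) (act : List Char) (data : List Char) : List Char :=
  let k := PySem.Int.floordiv ((data.length : Int) - 1) wid
  (((PySem.List.pyRange 0 k 1).map (fun i =>
      "execute=".toList ++ (if i = 0 then act else "append".toList)
        ++ ":".toList ++ name ++ ":".toList
        ++ PySem.List.slice data (some (i * wid)) (some ((i + 1) * wid)) ++ ";\n".toList))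
    ++ ["execute=finish:".toList ++ name ++ ":".toList
        ++ PySem.List.slice data (some (k * wid)) none ++ ";\n".toList]).flatten

theorem sliceNN (xs : List Char) (a b : Nat) :
    PySem.List.slice xs (some (a:Int)) (some (b:Int)) = (xs.drop a).take (b - a) := by
  rw [PySem.List.slice_toNat _ (by positivity) (by positivity)]; simp

theorem sliceN (xs : List Char) (a : Nat) :
    PySem.List.slice xs (some (a:Int)) none = xs.drop a := by
  rw [PySem.List.slice_some_none, PySem.List.clampIdx_natCast]
  rcases le_or_gt a xs.length with h | h
  · rw [min_eq_left h]
  · rw [min_eq_right (le_of_lt h), List.drop_length, List.drop_eq_nil_iff.mpr (le_of_lt h)]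

theorem fdStep (n w : Nat) (hw : 1 ≤ w) (h : w < n) :
    PySem.Int.floordiv ((n:Int) - 1) (w:Int)
      = PySem.Int.floordiv (((n - w : Nat):Int) - 1) (w:Int) + 1 := by
  have hw' : (0:Int) < w := by exact_mod_cast hw
  rw [PySem.Int.floordiv_eq_ediv_of_pos hw', PySem.Int.floordiv_eq_ediv_of_pos hw']
  have : ((n:Int) - 1) = (((n - w : Nat):Int) - 1) + 1 * w := by push_cast [le_of_lt h]; ring
  rw [this, Int.add_mul_ediv_right _ _ (by omega)]

theorem fdNonneg (n w : Nat) (hw : 1 ≤ w) (h : 1 ≤ n) :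
    0 ≤ PySem.Int.floordiv ((n:Int) - 1) (w:Int) := by
  rw [PySem.Int.le_floordiv_iff_mul_le (by exact_mod_cast hw)]; omega

theorem fdNegOne (w : Nat) (hw : 1 ≤ w) : PySem.Int.floordiv (-1) (w:Int) = -1 := by
  rw [PySem.Int.floordiv_eq_iff_of_pos (by exact_mod_cast hw)]
  constructor <;> push_cast <;> nlinarith

theorem map_pyRangeK {α : Type} (k : Int) (f : Int → α) :
    (PySem.List.pyRange 0 k 1).map f = (List.range k.toNat).map (fun j : Nat => f (j:Int)) := by
  rw [PySem.List.pyRange_one]; simp [List.map_map]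

theorem body_step (name : List Char) (w : Nat) (hw : 1 ≤ w) (data act : List Char)
    (h : (w:Int) < data.length) :
    fsBodyB name (w:Int) act data =
      ("execute=".toList ++ act ++ ":".toList ++ name ++ ":".toList
        ++ PySem.List.slice data (some 0) (some (w:Int)) ++ ";\n".toList)
      ++ fsBodyB name (w:Int) "append".toList (data.drop w) := by
  have hn : w < data.length := by exact_mod_cast h
  obtain ⟨kn, hkn⟩ : ∃ kn : Nat,
      PySem.Int.floordiv (((data.length - w : Nat):Int) - 1) (w:Int) = (kn:Int) - 1 := by
    rcases Nat.eq_zero_or_pos (data.length - w) with h0 | h0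
    · exact ⟨0, by rw [h0]; push_cast; simp [fdNegOne w hw]⟩
    · exact ⟨(PySem.Int.floordiv (((data.length - w : Nat):Int) - 1) (w:Int)).toNat + 1, by
        push_cast [Int.toNat_of_nonneg (fdNonneg _ _ hw h0)]; ring⟩
  unfold fsBodyB
  simp only [List.length_drop, hkn, fdStep data.length w hw hn]
  rw [show (kn:Int) - 1 + 1 = (kn:Int) by ring, map_pyRangeK, map_pyRangeK, Int.toNat_natCast]
  rcases Nat.eq_zero_or_pos kn with rfl | hkpos
  · -- kn = 0 : no non-final chunks on the dropped side and exactly... wait kn=0 means k = 0?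
    -- then k = kn - 1 + 1 = 0 on the left: but the loop fired, so k ≥ 1; contradiction? no:
    -- left k = ↑kn - 1 + 1 = ↑kn = 0, range empty; but h says w < len so there IS a chunk.
    exfalso
    have h1 : 1 ≤ PySem.Int.floordiv ((data.length:Int) - 1) (w:Int) := by
      rw [PySem.Int.le_floordiv_iff_mul_le (by exact_mod_cast hw)]; omega
    rw [fdStep data.length w hw hn, hkn] at h1; norm_num at h1
  · obtain ⟨km, rfl⟩ : ∃ km, kn = km + 1 := ⟨kn - 1, by omega⟩
    rw [List.range_succ_eq_map,
        show ((km+1:Nat):Int) - 1 = (km:Int) by push_cast; ring, Int.toNat_natCast]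
    simp only [List.map_cons, List.map_map, Nat.cast_zero, zero_mul, zero_add,
      one_mul, if_pos]
    have hmap : (List.map
        ((fun j : Nat =>
            "execute=".toList ++ (if (j:Int) = 0 then act else "append".toList)
              ++ ":".toList ++ name ++ ":".toList
              ++ PySem.List.slice data (some ((j:Int) * w)) (some (((j:Int) + 1) * w)) ++ ";\n".toList) ∘
          Nat.succ)
        (List.range km))
      = List.map
        (fun j : Nat =>
            "execute=".toList ++ (if (j:Int) = 0 then "append".toList else "append".toList)
              ++ ":".toList ++ name ++ ":".toList
              ++ PySem.List.slice (data.drop w) (some ((j:Int) * w)) (some (((j:Int) + 1) * w)) ++ ";\n".toList)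
        (List.range km) := by
      apply List.map_congr_left
      intro j _
      simp only [Function.comp_apply]
      have h1 : ((Nat.succ j : Nat) : Int) * w = (((j+1)*w : Nat) : Int) := by push_cast; try ring
      have h2 : (((Nat.succ j : Nat) : Int) + 1) * w = (((j+2)*w : Nat) : Int) := by push_cast; try ring
      have h3 : (j:Int) * w = (((j*w : Nat)) : Int) := by push_cast; try ring
      have h4 : ((j:Int) + 1) * w = ((((j+1)*w : Nat)) : Int) := by push_cast; try ring
      rw [h1, h2, h3, h4, sliceNN, sliceNN]
      have hd : (data.drop ((j+1)*w)) = (data.drop w).drop (j*w) := by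
        rw [List.drop_drop]; congr 1; ring
      have ht : (j+2)*w - (j+1)*w = (j+1)*w - j*w := by ring_nf; omega
      rw [hd, ht, if_neg (show ((Nat.succ j : Nat):Int) ≠ 0 by exact_mod_cast Nat.succ_ne_zero j),
        ite_self]
    have hfin : PySem.List.slice data (some ((((km:Int) + 1)) * w)) none
        = PySem.List.slice (data.drop w) (some ((km:Int) * w)) none := by
      have h5 : ((km:Int) + 1) * w = ((((km+1)*w : Nat)) : Int) := by push_cast; try ring
      have h6 : (km:Int) * w = (((km*w : Nat)) : Int) := by push_cast; try ring
      rw [h5, h6, sliceN, sliceN, List.drop_drop,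
        show w + km*w = (km+1)*w by ring]
    rw [hmap]
    rw [show ((km+1:Nat):Int) = (km:Int) + 1 by push_cast; ring] at *
    rw [hfin]
    simp [List.append_assoc]

theorem body_exit (name : List Char) (w : Nat) (hw : 1 ≤ w) (data act : List Char)
    (h : data.length ≤ w) :
    fsBodyB name (w:Int) act data
      = "execute=finish:".toList ++ name ++ ":".toList ++ data ++ ";\n".toList := by
  unfold fsBodyB
  rcases Nat.eq_zero_or_pos data.length with h0 | h0
  · rw [List.length_eq_zero_iff.mp h0]
    simp only [List.length_nil, Nat.cast_zero, zero_sub, fdNegOne w hw]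
    rw [PySem.List.pyRange_one_eq_nil (by norm_num)]
    simp [PySem.List.slice_some_none]
  · have hk : PySem.Int.floordiv ((data.length:Int) - 1) (w:Int) = 0 := by
      rw [PySem.Int.floordiv_eq_iff_of_pos (by exact_mod_cast hw)]
      constructor <;> push_cast <;> nlinarith [h0, h]
    simp only [hk]
    rw [PySem.List.pyRange_one_eq_nil (by norm_num)]
    simp only [zero_mul, List.map_nil, List.nil_append, List.flatten_cons, List.flatten_nil,
      List.append_nil]
    rw [show (0:Int) = ((0:Nat):Int) by norm_num, sliceN]
    simp

theorem fsLoopA_eq_body (name : List Char) (w : Nat) (hw : 1 ≤ w) :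
    ∀ (fuel : Nat) (data mess act : List Char), data.length ≤ fuel →
      fsLoopA name (w:Int) fuel data mess act = mess ++ fsBodyB name (w:Int) act data := by
  intro fuel
  induction fuel with
  | zero =>
    intro data mess act hf
    rw [List.length_eq_zero_iff.mp (Nat.le_zero.mp hf)]
    rw [fsLoopA, body_exit name w hw _ act (by simp)]
  | succ n ih =>
    intro data mess act hf
    rw [fsLoopA]
    by_cases h : (w:Int) < (data.length:Int)
    · rw [if_pos h, sliceN]
      have hlen : (data.drop w).length ≤ n := by
        simp only [List.length_drop]
        have : w < data.length := by exact_mod_cast h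
        omega
      rw [ih _ _ _ hlen, body_step name w hw data act h]
      simp [List.append_assoc]
    · rw [if_neg h, body_exit name w hw _ act (by exact_mod_cast not_lt.mp h)]

-- ===== VERDICT (by name: the statement is the Claim_ definition above) =====
theorem formatscans_spec : Claim_equal_formatscans := by
  intro name wid data _ hp
  unfold Pre_formatscans at hp
  obtain ⟨w, rfl⟩ : ∃ w : Nat, wid = (w:Int) :=
    ⟨wid.toNat, (Int.toNat_of_nonneg (by omega)).symm⟩
  have hw : 1 ≤ w := by exact_mod_cast hp
  show formatscans name (w:Int) data = formatscans_alt name (w:Int) data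
  unfold formatscans formatscans_alt
  rw [fsLoopA_eq_body name.toList w hw _ _ _ _ le_rfl, List.nil_append]
  rfl
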